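-- pv_equiv track=rewrite | github.com/WikiAgents/WikiAgents | shared/test.py | sanitize_json_completion
-- ===== SOURCE A (Python) =====
-- def sanitize_json_completion(completion: str) -> str:
--     """
--     Return only content inside the first pair of triple backticks if they are present.
--     """
--     tiks_counter = 0
--     lines = completion.strip().split("\n")
--     clean_lines = []
--     for line in lines:
--         if line.startswith("```"):
--             tiks_counter += 1
--             if tiks_counter == 1:
--                 clean_lines = []
--             elif tiks_counter == 2:
--                 break
--             continue
--         clean_lines.append(line)
--     return "\n".join(clean_lines)
-- ===== SOURCE B (Python) =====
-- def sanitize_json_completion(completion: str) -> str: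
--     lines = completion.strip().split("\n")
--     fences = [i for i, line in enumerate(lines) if line.startswith("```")]
--     if not fences:
--         selected = lines
--     elif len(fences) == 1:
--         selected = lines[fences[0] + 1:]
--     else:
--         selected = lines[fences[0] + 1:fences[1]]
--     return "\n".join(selected)
-- ===== Notes on version B (the rewrite author's own statement) =====
-- stated objective: alternative
-- what changed: Replaced A's single-pass counter/reset/break state machine with a two-phase locate-then-slice computation: collect the indices of fence lines, then select lines (no fence), lines after the first fence (one fence), or the lines strictly between the first two fences, and join them.
import Mathlib
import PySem

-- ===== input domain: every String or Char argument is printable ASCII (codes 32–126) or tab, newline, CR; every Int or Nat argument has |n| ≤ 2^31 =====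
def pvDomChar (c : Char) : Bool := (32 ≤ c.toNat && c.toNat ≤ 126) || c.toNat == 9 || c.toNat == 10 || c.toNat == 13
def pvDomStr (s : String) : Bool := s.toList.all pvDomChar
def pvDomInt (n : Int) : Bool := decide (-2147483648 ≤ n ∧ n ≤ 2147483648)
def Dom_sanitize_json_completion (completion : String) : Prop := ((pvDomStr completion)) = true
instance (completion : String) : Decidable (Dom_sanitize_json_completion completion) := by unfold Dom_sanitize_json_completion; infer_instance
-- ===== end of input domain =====

-- B replaces A's counter/reset/break state machine with a locate-fences-then-slice two-phase computation (alternative decomposition, same cost).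


-- ===== PORT A =====
-- line.startswith("```")
def pvFence (l : String) : Bool := PySem.Str.startswith l "```"

-- completion.strip().split("\n")  (sep "\n" is non-empty, so split? never returns none)
def pvLines (completion : String) : List String :=
  (PySem.Str.split? (PySem.Str.strip completion) "\n").getD []

-- the for-loop of A, state = (tiks_counter, clean_lines); break returns the accumulator
def pvALoop : List String → Nat → List String → List String
  | [], _, acc => acc
  | l :: rest, tiks, acc =>
    if pvFence l then
      if tiks + 1 = 1 then pvALoop rest (tiks + 1) []
      else if tiks + 1 = 2 then acc
      else pvALoop rest (tiks + 1) acc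
    else pvALoop rest tiks (acc ++ [l])

def sanitize_json_completion (completion : String) : String :=
  PySem.Str.join "\n" (pvALoop (pvLines completion) 0 [])

-- ===== PORT B =====
def sanitize_json_completion_alt (completion : String) : String :=
  let lines := pvLines completion
  let fences := (PySem.List.enumerate lines 0).filterMap
    (fun p => if pvFence p.2 then some p.1 else none)
  let selected : List String :=
    match fences with
    | [] => lines
    | [i] => PySem.List.slice lines (some (i + 1)) none
    | i :: j :: _ => PySem.List.slice lines (some (i + 1)) (some j)
  PySem.Str.join "\n" selected

-- ===== PRECONDITION & SPEC =====
def Spec_sanitize_json_completion (completion : String) (out : String) : Prop := out = sanitize_json_completion_alt completion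
instance (completion : String) (out : String) : Decidable (Spec_sanitize_json_completion completion out) := by unfold Spec_sanitize_json_completion; infer_instance

-- ===== CLAIM (what is proved, stated in full; the proofs are below) =====
def Claim_equal_sanitize_json_completion : Prop := ∀ (completion : String), Dom_sanitize_json_completion completion → Spec_sanitize_json_completion completion (sanitize_json_completion completion)

-- ===== LEMMAS AND PROOFS =====

-- fence-index list of a line list (proof-side characterisation of B's filterMap)
def pvF : List String → List Nat
  | [] => []
  | l :: rest =>
    if pvFence l then 0 :: (pvF rest).map (· + 1)
    else (pvF rest).map (· + 1)

-- lines collected by A's loop once the first fence was seen (tiks = 1)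
def pvSpec1 : List String → List String
  | [] => []
  | l :: rest => if pvFence l then [] else l :: pvSpec1 rest

lemma pvALoop_one (ls : List String) : ∀ acc, pvALoop ls 1 acc = acc ++ pvSpec1 ls := by
  induction ls with
  | nil => intro acc; simp [pvALoop, pvSpec1]
  | cons l rest ih =>
    intro acc
    by_cases h : pvFence l = true <;>
      simp [pvALoop, pvSpec1, h, ih (acc ++ [l])]

lemma pvSpec1_eq_F (ls : List String) :
    pvSpec1 ls = match pvF ls with | [] => ls | j :: _ => ls.take j := by
  induction ls with
  | nil => simp [pvSpec1, pvF]
  | cons l rest ih =>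
    by_cases h : pvFence l = true
    · simp [pvSpec1, pvF, h]
    · simp only [pvSpec1, pvF, h, Bool.false_eq_true, if_false, ih]
      cases hF : pvF rest with
      | nil => simp
      | cons j t => simp [List.take_succ_cons]

lemma pvALoop_key (ls : List String) : ∀ acc, pvALoop ls 0 acc =
    match pvF ls with
    | [] => acc ++ ls
    | [i] => ls.drop (i + 1)
    | i :: j :: _ => (ls.drop (i + 1)).take (j - (i + 1)) := by
  induction ls with
  | nil => intro acc; simp [pvALoop, pvF]
  | cons l rest ih =>
    intro acc
    by_cases h : pvFence l = true
    · have h1 := pvALoop_one rest []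
      have h2 := pvSpec1_eq_F rest
      simp only [pvALoop, pvF, h, if_true, List.nil_append] at *
      rw [h1, h2]
      cases hF : pvF rest with
      | nil => simp
      | cons j t => cases t <;> simp
    · simp only [pvALoop, pvF, h, Bool.false_eq_true, if_false, ih (acc ++ [l])]
      cases hF : pvF rest with
      | nil => simp
      | cons i t =>
        cases t with
        | nil => simp
        | cons j t' =>
          simp only [List.map_cons, List.drop_succ_cons]
          congr 1
          omega

lemma pvFences_eq (ls : List String) : ∀ (s : Nat),
    (PySem.List.enumerate ls (s : Int)).filterMap
      (fun p => if pvFence p.2 then some p.1 else none)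
    = (pvF ls).map (fun k => ((s + k : Nat) : Int)) := by
  induction ls with
  | nil => intro s; simp [PySem.List.enumerate_nil, pvF]
  | cons l rest ih =>
    intro s
    have hc : ((s : Int) + 1) = ((s + 1 : Nat) : Int) := by push_cast; ring
    have hmap : ((pvF rest).map (fun k => ((s + 1 + k : Nat) : Int)))
        = ((pvF rest).map (· + 1)).map (fun k => ((s + k : Nat) : Int)) := by
      rw [List.map_map]; apply List.map_congr_left; intro k _
      simp only [Function.comp_apply]; push_cast; ring
    rw [PySem.List.enumerate_cons, hc]
    by_cases h : pvFence l = true <;>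
      simp only [pvF, h, if_true, Bool.false_eq_true, if_false, List.filterMap_cons,
        List.map_cons, ih (s + 1), hmap, Nat.add_zero]

-- ===== VERDICT (by name: the statement is the Claim_ definition above) =====
theorem sanitize_json_completion_spec : Claim_equal_sanitize_json_completion := by
  intro completion _
  unfold Spec_sanitize_json_completion sanitize_json_completion sanitize_json_completion_alt
  set ls := pvLines completion with hls
  have hfen := pvFences_eq ls 0
  simp only [Nat.zero_add, Nat.cast_zero] at hfen
  rw [pvALoop_key ls []]
  simp only [hfen, List.nil_append]
  cases hF : pvF ls with
  | nil => simp
  | cons i t =>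
    cases t with
    | nil =>
      have h1 : ((i : Int) + 1) = ((i + 1 : Nat) : Int) := by push_cast; ring
      simp only [List.map_cons, List.map_nil]
      rw [h1, PySem.List.slice_from_natCast]
    | cons j t' =>
      have h1 : ((i : Int) + 1) = ((i + 1 : Nat) : Int) := by push_cast; ring
      simp only [List.map_cons]
      rw [h1, PySem.List.slice_natCast]
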